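-- pv_equiv track=rewrite | github.com/lachimex/ASD | zestaw4zadanie18.py | ex18
-- ===== SOURCE A (Python) =====
-- def ex18(t):
--     n = len(t)
--     maks = 0
--     coordinates = [0, 0, "null"]
--     for y in range(n):
--         for x in range(n):
--             suma = 0
--             counter = 0
--             for i in range(x, n):
--                 counter += 1
--                 if counter > 10:
--                     break
--                 suma += t[y][i]
--             if suma > maks:
--                 coordinates[0] = y
--                 coordinates[1] = x
--                 coordinates[2] = "wiersz"
--             maks = max(maks, suma)
--
--     for x in range(n):
--         for y in range(n):
--             suma = 0
--             counter = 0
--             for i in range(y, n):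
--                 counter += 1
--                 if counter > 10:
--                     break
--                 suma += t[i][x]
--             if suma > maks:
--                 coordinates[0] = y
--                 coordinates[1] = x
--                 coordinates[2] = "kolumna"
--             maks = max(maks, suma)
--     return maks, coordinates[0], coordinates[1], coordinates[2]
-- ===== SOURCE B (Python) =====
-- def ex18(t):
--     n = len(t)
--     best = 0
--     cy, cx, lab = 0, 0, "null"
--     # prefix sums of each row (first n entries) and of each column
--     R = []
--     for row in t:
--         p = [0]
--         for v in row[:n]:
--             p.append(p[-1] + v)
--         R.append(p)
--     C = []
--     for x in range(n):
--         p = [0]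
--         for row in t:
--             p.append(p[-1] + row[x])
--         C.append(p)
--     for y in range(n):
--         p = R[y]
--         for x in range(n):
--             s = p[min(x + 10, n)] - p[x]
--             if s > best:
--                 cy, cx, lab = y, x, "wiersz"
--                 best = s
--     for x in range(n):
--         p = C[x]
--         for y in range(n):
--             s = p[min(y + 10, n)] - p[y]
--             if s > best:
--                 cy, cx, lab = y, x, "kolumna"
--                 best = s
--     return best, cy, cx, lab
-- ===== Notes on version B (the rewrite author's own statement) =====
-- stated objective: faster
-- what changed: B precomputes row and column prefix-sum tables once and reads each length-≤10 window sum as a difference of two prefix entries, replacing A's inner 10-step summation loop per cell; scan order and strict-> tie-breaking are unchanged.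
import Mathlib
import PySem

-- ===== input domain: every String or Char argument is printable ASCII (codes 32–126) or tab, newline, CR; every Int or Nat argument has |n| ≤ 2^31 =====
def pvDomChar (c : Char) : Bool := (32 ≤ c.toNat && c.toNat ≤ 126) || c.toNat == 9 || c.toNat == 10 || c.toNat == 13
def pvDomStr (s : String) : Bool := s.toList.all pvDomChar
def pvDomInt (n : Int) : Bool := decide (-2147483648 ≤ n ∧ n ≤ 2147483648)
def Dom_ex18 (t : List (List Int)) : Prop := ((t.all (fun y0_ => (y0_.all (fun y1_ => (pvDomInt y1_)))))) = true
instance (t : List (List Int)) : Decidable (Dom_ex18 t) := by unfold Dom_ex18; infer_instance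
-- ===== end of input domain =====

-- B replaces A's length-10 inner summation loop with row/column prefix-sum tables
-- (window sum = difference of two prefix values); constant-factor speedup, same O(n^2) scan order.

-- ===== PORT A =====
-- t[y][i] on an in-range index (guaranteed by Pre_ex18)
def pvCell (t : List (List Int)) (y i : Int) : Int :=
  PySem.List.pyGetD (PySem.List.pyGetD t y []) i 0

-- A's inner loop: 'suma = 0; counter = 0; for i in idxs: counter += 1; if counter > 10: break; suma += get i'
def pvWin (get : Int → Int) : List Int → Int → Int → Int
  | [], suma, _ => suma
  | i :: rest, suma, counter =>
    let c := counter + 1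
    if c > 10 then suma else pvWin get rest (suma + get i) c

def ex18 (t : List (List Int)) : Int × Int × Int × String :=
  let n : Int := t.length
  let s1 := (PySem.List.pyRange 0 n 1).foldl (fun st y =>
    (PySem.List.pyRange 0 n 1).foldl (fun st x =>
      let suma := pvWin (fun i => pvCell t y i) (PySem.List.pyRange x n 1) 0 0
      if suma > st.1 then (max st.1 suma, y, x, "wiersz")
      else (max st.1 suma, st.2)) st) (0, 0, 0, "null")
  let s2 := (PySem.List.pyRange 0 n 1).foldl (fun st x =>
    (PySem.List.pyRange 0 n 1).foldl (fun st y =>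
      let suma := pvWin (fun i => pvCell t i x) (PySem.List.pyRange y n 1) 0 0
      if suma > st.1 then (max st.1 suma, y, x, "kolumna")
      else (max st.1 suma, st.2)) st) s1
  s2

-- ===== PORT B =====
-- 'p = [0]; for v in xs: p.append(p[-1] + v)' : running prefix sums
def pvScan (acc : Int) : List Int → List Int
  | [] => []
  | v :: rest => (acc + v) :: pvScan (acc + v) rest

def pvPrefix (xs : List Int) : List Int := 0 :: pvScan 0 xs

def ex18_alt (t : List (List Int)) : Int × Int × Int × String :=
  let n : Int := t.length
  let R := t.map (fun row => pvPrefix (PySem.List.slice row none (some n)))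
  let C := (PySem.List.pyRange 0 n 1).map (fun x =>
    pvPrefix (t.map (fun row => PySem.List.pyGetD row x 0)))
  let s1 := (PySem.List.pyRange 0 n 1).foldl (fun st y =>
    let p := PySem.List.pyGetD R y []
    (PySem.List.pyRange 0 n 1).foldl (fun st x =>
      let s := PySem.List.pyGetD p (min (x + 10) n) 0 - PySem.List.pyGetD p x 0
      if s > st.1 then (s, y, x, "wiersz") else st) st) (0, 0, 0, "null")
  let s2 := (PySem.List.pyRange 0 n 1).foldl (fun st x =>
    let p := PySem.List.pyGetD C x []
    (PySem.List.pyRange 0 n 1).foldl (fun st y =>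
      let s := PySem.List.pyGetD p (min (y + 10) n) 0 - PySem.List.pyGetD p y 0
      if s > st.1 then (s, y, x, "kolumna") else st) st) s1
  s2

-- ===== PRECONDITION & SPEC =====
-- A indexes t[y][i] and t[i][x] for all indices below len(t): any row shorter than len(t)
-- makes A (and B) raise IndexError, so exactly those inputs are excluded.
def Pre_ex18 (t : List (List Int)) : Prop :=
  ∀ row ∈ t, (t.length : Int) ≤ (row.length : Int)
instance (t : List (List Int)) : Decidable (Pre_ex18 t) := by unfold Pre_ex18; infer_instance

def pvWitness_ex18 : List (List Int) := [[1, 2], [3, 4]]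

def Spec_ex18 (t : List (List Int)) (out : Int × Int × Int × String) : Prop := out = ex18_alt t
instance (t : List (List Int)) (out : Int × Int × Int × String) : Decidable (Spec_ex18 t out) := by unfold Spec_ex18; infer_instance

-- ===== CLAIM (what is proved, stated in full; the proofs are below) =====
def Claim_equal_ex18 : Prop := ∀ (t : List (List Int)), Dom_ex18 t → Pre_ex18 t → Spec_ex18 t (ex18 t)

-- ===== LEMMAS AND PROOFS =====

-- A's capped loop sums the first 10 listed elements
lemma pvWin_eq (get : Int → Int) (idxs : List Int) :
    ∀ (suma counter : Int), 0 ≤ counter → counter ≤ 10 →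
      pvWin get idxs suma counter = suma + ((idxs.take (10 - counter).toNat).map get).sum := by
  induction idxs with
  | nil => intro suma c _ _; simp [pvWin]
  | cons i rest ih =>
    intro suma c h0 h10
    by_cases h : c = 10
    · subst h; simp [pvWin]
    · have hc : ¬ (c + 1 > 10) := by omega
      have hk : (10 - c).toNat = (10 - (c + 1)).toNat + 1 := by omega
      simp only [pvWin, hc, if_false]
      rw [ih (suma + get i) (c + 1) (by omega) (by omega), hk]
      simp [List.take_succ_cons]
      ring

lemma take_pyRange (a b : Int) (k : Nat) :
    (PySem.List.pyRange a b 1).take k = PySem.List.pyRange a (min (a + k) b) 1 := by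
  rw [PySem.List.pyRange_one, PySem.List.pyRange_one, ← List.map_take, List.take_range]
  have h : min k (b - a).toNat = (min (a + (k : Int)) b - a).toNat := by omega
  rw [h]

-- prefix-sum table: entry k is the sum of the first k elements
lemma pvScan_shift (a : Int) (xs : List Int) :
    ∀ c : Int, pvScan (a + c) xs = (pvScan c xs).map (a + ·) := by
  induction xs with
  | nil => intro c; simp [pvScan]
  | cons v rest ih =>
    intro c
    simp only [pvScan, List.map_cons]
    rw [show a + c + v = a + (c + v) by ring, ih (c + v)]

lemma pvPrefix_cons (v : Int) (xs : List Int) :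
    pvPrefix (v :: xs) = 0 :: (pvPrefix xs).map (v + ·) := by
  simp only [pvPrefix, pvScan, List.map_cons]
  rw [show (0 : Int) + v = v + 0 by ring, pvScan_shift v xs 0]

lemma length_pvPrefix (xs : List Int) : (pvPrefix xs).length = xs.length + 1 := by
  induction xs with
  | nil => simp [pvPrefix, pvScan]
  | cons v rest ih => rw [pvPrefix_cons]; simp_all

lemma pvPrefix_getElem (xs : List Int) :
    ∀ (k : Nat) (h : k < (pvPrefix xs).length), (pvPrefix xs)[k] = (xs.take k).sum := by
  induction xs with
  | nil =>
    intro k h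
    rw [length_pvPrefix] at h
    have hk : k = 0 := by simp at h; omega
    subst hk
    simp [pvPrefix, pvScan]
  | cons v rest ih =>
    intro k h
    rcases k with _ | k
    · simp [pvPrefix_cons]
    · have hk : k < (pvPrefix rest).length := by
        rw [length_pvPrefix] at *; simpa [pvPrefix_cons] using h
      simp only [pvPrefix_cons, List.getElem_cons_succ, List.getElem_map, ih k hk,
        List.take_succ_cons, List.sum_cons]

lemma pvPrefix_getD (xs : List Int) (k : Int) (h0 : 0 ≤ k) (hk : k.toNat ≤ xs.length) :
    PySem.List.pyGetD (pvPrefix xs) k 0 = (xs.take k.toNat).sum := by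
  rw [PySem.List.pyGetD_eq_getElem _ 0 h0 (by rw [length_pvPrefix]; push_cast; omega)]
  exact pvPrefix_getElem xs k.toNat (by rw [length_pvPrefix]; omega)

-- window sum over indices [x, m) of xs equals a difference of prefix sums
lemma window_eq (xs : List Int) (x m : Int) (hx : 0 ≤ x) (hxm : x ≤ m)
    (hm : m.toNat ≤ xs.length) :
    ((PySem.List.pyRange x m 1).map (fun i => PySem.List.pyGetD xs i 0)).sum
      = (xs.take m.toNat).sum - (xs.take x.toNat).sum := by
  have hlen : ((xs.take m.toNat).length : Int) = m := by
    simp [List.length_take]; omega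
  have h1 : (PySem.List.pyRange x m 1).map (fun i => PySem.List.pyGetD xs i 0)
      = (PySem.List.pyRange x ((xs.take m.toNat).length : Int) 1).map
          (fun i => PySem.List.pyGetD (xs.take m.toNat) i 0) := by
    rw [hlen]
    refine List.map_congr_left ?_
    intro i hi
    rw [PySem.List.mem_pyRange_one] at hi
    rw [PySem.List.pyGetD_eq_getElem _ 0 (by omega) (by omega),
        PySem.List.pyGetD_eq_getElem _ 0 (by omega)
          (by simp [List.length_take]; omega)]
    rw [List.getElem_take]
  rw [h1, PySem.List.map_pyGetD_pyRange' _ 0 hx]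
  have h2 : xs.take x.toNat ++ (xs.take m.toNat).drop x.toNat = xs.take m.toNat := by
    have hx2 : xs.take x.toNat = (xs.take m.toNat).take x.toNat := by
      rw [List.take_take]
      have : min x.toNat m.toNat = x.toNat := by omega
      rw [this]
    rw [hx2, List.take_append_drop]
  conv_rhs => rw [← h2]
  rw [List.sum_append]
  ring

-- A's window for row y starting at x equals the prefix-table difference B computes
lemma cell_row (t : List (List Int)) (hPre : Pre_ex18 t) (y x : Int)
    (hy0 : 0 ≤ y) (hy1 : y < (t.length : Int)) (hx0 : 0 ≤ x) (hx1 : x < (t.length : Int)) :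
    pvWin (fun i => pvCell t y i) (PySem.List.pyRange x (t.length : Int) 1) 0 0
      = PySem.List.pyGetD (PySem.List.pyGetD
            (t.map (fun row => pvPrefix (PySem.List.slice row none (some (t.length : Int))))) y [])
          (min (x + 10) (t.length : Int)) 0
        - PySem.List.pyGetD (PySem.List.pyGetD
            (t.map (fun row => pvPrefix (PySem.List.slice row none (some (t.length : Int))))) y [])
          x 0 := by
  have hn0 : (0 : Int) ≤ (t.length : Int) := Int.natCast_nonneg _
  have hyN : y.toNat < t.length := by omega
  have hrow : PySem.List.pyGetD t y [] = t[y.toNat] :=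
    PySem.List.pyGetD_eq_getElem t [] hy0 (by exact_mod_cast hy1)
  have hlenN : t.length ≤ (t[y.toNat]).length := by
    have := hPre _ (List.getElem_mem hyN)
    exact_mod_cast this
  have hR : PySem.List.pyGetD
      (t.map (fun row => pvPrefix (PySem.List.slice row none (some (t.length : Int))))) y []
      = pvPrefix ((t[y.toNat]).take t.length) := by
    rw [PySem.List.pyGetD_eq_getElem _ [] hy0 (by simpa using hy1), List.getElem_map,
      PySem.List.slice_to _ hn0]
    simp
  rw [pvWin_eq _ _ 0 0 le_rfl (by norm_num)]
  have h10 : ((10 : Int) - 0).toNat = 10 := by decide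
  rw [h10, take_pyRange x (t.length : Int) 10]
  have hc : x + ((10 : Nat) : Int) = x + 10 := by norm_num
  rw [hc]
  have hmap : (PySem.List.pyRange x (min (x + 10) (t.length : Int)) 1).map (fun i => pvCell t y i)
      = (PySem.List.pyRange x (min (x + 10) (t.length : Int)) 1).map
          (fun i => PySem.List.pyGetD (t[y.toNat]) i 0) := by
    refine List.map_congr_left ?_
    intro i _
    simp only [pvCell, hrow]
  rw [hmap, window_eq (t[y.toNat]) x (min (x + 10) (t.length : Int)) hx0 (by omega) (by omega)]
  rw [hR, pvPrefix_getD _ (min (x + 10) (t.length : Int)) (by omega)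
        (by simp [List.length_take]; omega),
      pvPrefix_getD _ x hx0 (by simp [List.length_take]; omega),
      List.take_take, List.take_take]
  have h1 : min (min (x + 10) (t.length : Int)).toNat t.length = (min (x + 10) (t.length : Int)).toNat := by omega
  have h2 : min x.toNat t.length = x.toNat := by omega
  rw [h1, h2]
  ring

-- A's window for column x starting at y equals the prefix-table difference B computes
lemma cell_col (t : List (List Int)) (_hPre : Pre_ex18 t) (x y : Int)
    (hx0 : 0 ≤ x) (hx1 : x < (t.length : Int)) (hy0 : 0 ≤ y) (hy1 : y < (t.length : Int)) :
    pvWin (fun i => pvCell t i x) (PySem.List.pyRange y (t.length : Int) 1) 0 0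
      = PySem.List.pyGetD (PySem.List.pyGetD
            ((PySem.List.pyRange 0 (t.length : Int) 1).map (fun x' =>
              pvPrefix (t.map (fun row => PySem.List.pyGetD row x' 0)))) x [])
          (min (y + 10) (t.length : Int)) 0
        - PySem.List.pyGetD (PySem.List.pyGetD
            ((PySem.List.pyRange 0 (t.length : Int) 1).map (fun x' =>
              pvPrefix (t.map (fun row => PySem.List.pyGetD row x' 0)))) x [])
          y 0 := by
  have hC : PySem.List.pyGetD
      ((PySem.List.pyRange 0 (t.length : Int) 1).map (fun x' =>
        pvPrefix (t.map (fun row => PySem.List.pyGetD row x' 0)))) x []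
      = pvPrefix (t.map (fun row => PySem.List.pyGetD row x 0)) :=
    PySem.List.pyGetD_map_pyRange_of_nonneg _ _ _ _ hx0 hx1
  have hcol : (t.map (fun row => PySem.List.pyGetD row x 0)).length = t.length := by simp
  rw [pvWin_eq _ _ 0 0 le_rfl (by norm_num)]
  have h10 : ((10 : Int) - 0).toNat = 10 := by decide
  rw [h10, take_pyRange y (t.length : Int) 10]
  have hc : y + ((10 : Nat) : Int) = y + 10 := by norm_num
  rw [hc]
  have hmap : (PySem.List.pyRange y (min (y + 10) (t.length : Int)) 1).map (fun i => pvCell t i x)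
      = (PySem.List.pyRange y (min (y + 10) (t.length : Int)) 1).map
          (fun i => PySem.List.pyGetD (t.map (fun row => PySem.List.pyGetD row x 0)) i 0) := by
    refine List.map_congr_left ?_
    intro i hi
    rw [PySem.List.mem_pyRange_one] at hi
    have hi1 : i < (t.length : Int) := by omega
    have hiN : i.toNat < t.length := by omega
    simp only [pvCell]
    rw [PySem.List.pyGetD_eq_getElem t [] (by omega) (by exact_mod_cast hi1),
      PySem.List.pyGetD_eq_getElem (t.map (fun row => PySem.List.pyGetD row x 0)) 0
        (by omega) (by rw [hcol]; exact_mod_cast hi1),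
      List.getElem_map]
  rw [hmap, window_eq (t.map (fun row => PySem.List.pyGetD row x 0)) y
        (min (y + 10) (t.length : Int)) hy0 (by omega) (by rw [hcol]; omega)]
  rw [hC, pvPrefix_getD _ (min (y + 10) (t.length : Int)) (by omega) (by rw [hcol]; omega),
      pvPrefix_getD _ y hy0 (by rw [hcol]; omega)]
  ring

-- both double loops keep the same state once the per-cell sums agree
lemma phase_eq (n : Int) (wA wB c1 c2 : Int → Int → Int) (lab : String)
    (hw : ∀ o i, 0 ≤ o → o < n → 0 ≤ i → i < n → wA o i = wB o i)
    (init : Int × Int × Int × String) :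
    (PySem.List.pyRange 0 n 1).foldl (fun st o => (PySem.List.pyRange 0 n 1).foldl (fun st i =>
        if wA o i > st.1 then (max st.1 (wA o i), c1 o i, c2 o i, lab)
        else (max st.1 (wA o i), st.2)) st) init
    = (PySem.List.pyRange 0 n 1).foldl (fun st o => (PySem.List.pyRange 0 n 1).foldl (fun st i =>
        if wB o i > st.1 then (wB o i, c1 o i, c2 o i, lab) else st) st) init := by
  apply PySem.List.foldl_congr_mem'
  intro o ho st
  apply PySem.List.foldl_congr_mem'
  intro i hi st'
  rw [PySem.List.mem_pyRange_one] at ho hi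
  rw [hw o i ho.1 ho.2 hi.1 hi.2]
  by_cases h : wB o i > st'.1
  · simp [h, max_eq_right (le_of_lt h)]
  · simp [h, max_eq_left (not_lt.1 h)]

-- ===== VERDICT (by name: the statement is the Claim_ definition above) =====
theorem ex18_spec : Claim_equal_ex18 := by
  intro t _ hPre
  unfold Spec_ex18
  simp only [ex18, ex18_alt]
  have h1 := phase_eq (t.length : Int) _ _ (fun o _ => o) (fun _ i => i) "wiersz"
    (fun o i a b c d => cell_row t hPre o i a b c d) ((0 : Int), (0 : Int), (0 : Int), "null")
  beta_reduce at h1 ⊢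
  rw [h1]
  exact phase_eq (t.length : Int) _ _ (fun _ i => i) (fun o _ => o) "kolumna"
    (fun o i a b c d => cell_col t hPre o i a b c d) _
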